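-- pv_equiv track=rewrite | github.com/Sovereigndwp/math-game-studio-os | agents/misconception_architect/agent.py | _infer_interaction_from_family
-- ===== SOURCE A (Python) =====
-- def _infer_interaction_from_family(family_name: str) -> str:
--     """Best-guess interaction type from family name when interaction_decision_memo
--     is not available. Checks for known game names first, then keyword matches."""
--     name = family_name.lower()
--     if any(k in name for k in ("bakery", "combine", "build", "sum", "total")):
--         return "combine_and_build"
--     if any(k in name for k in ("fire", "dispatch", "route", "sort", "assign")):
--         return "route_and_dispatch"
--     if any(k in name for k in ("unit circle", "angle", "navigate", "position", "circle", "coordinate")):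
--         return "navigate_and_position"
--     if any(k in name for k in ("balance", "equal", "allocate", "distribute")):
--         return "allocate_and_balance"
--     if any(k in name for k in ("pattern", "sequence", "predict", "series")):
--         return "sequence_and_predict"
--     if any(k in name for k in ("transform", "function", "operation", "algebra")):
--         return "transform_and_manipulate"
--     return "combine_and_build"  # safest default: most implemented family
-- ===== SOURCE B (Python) =====
-- _TYPES = [
--     "combine_and_build",
--     "route_and_dispatch",
--     "navigate_and_position",
--     "allocate_and_balance",
--     "sequence_and_predict",
--     "transform_and_manipulate",
-- ]
--
-- # Flat keyword -> priority map (priority = index into _TYPES).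
-- _KEYWORD_PRIORITY = {
--     "bakery": 0, "combine": 0, "build": 0, "sum": 0, "total": 0,
--     "fire": 1, "dispatch": 1, "route": 1, "sort": 1, "assign": 1,
--     "unit circle": 2, "angle": 2, "navigate": 2, "position": 2, "circle": 2, "coordinate": 2,
--     "balance": 3, "equal": 3, "allocate": 3, "distribute": 3,
--     "pattern": 4, "sequence": 4, "predict": 4, "series": 4,
--     "transform": 5, "function": 5, "operation": 5, "algebra": 5,
-- }
--
--
-- def _infer_interaction_from_family(family_name: str) -> str:
--     name = family_name.lower()
--     best = min((p for k, p in _KEYWORD_PRIORITY.items() if k in name), default=0)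
--     return _TYPES[best]
-- ===== Notes on version B (the rewrite author's own statement) =====
-- stated objective: alternative
-- what changed: Instead of testing six keyword groups in priority order with an if-chain, B inverts the data into one flat keyword->priority dict, takes the minimum priority among all keywords occurring in the lowercased name (default 0), and indexes a list of interaction types with it.
import Mathlib
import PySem

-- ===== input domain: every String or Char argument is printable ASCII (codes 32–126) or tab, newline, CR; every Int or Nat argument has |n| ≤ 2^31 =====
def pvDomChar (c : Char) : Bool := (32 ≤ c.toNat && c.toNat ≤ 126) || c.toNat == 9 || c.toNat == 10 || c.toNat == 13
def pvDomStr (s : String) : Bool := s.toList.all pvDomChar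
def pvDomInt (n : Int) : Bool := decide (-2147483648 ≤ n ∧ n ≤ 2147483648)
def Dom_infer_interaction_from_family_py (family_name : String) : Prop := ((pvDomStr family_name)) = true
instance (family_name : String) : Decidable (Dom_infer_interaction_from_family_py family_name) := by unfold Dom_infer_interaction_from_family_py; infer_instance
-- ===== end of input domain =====

-- B replaces A's priority-ordered if-chain of keyword groups by a flat keyword->priority
-- map: it takes the MINIMUM priority among all matching keywords (default 0) and indexes a
-- list of interaction types with it (objective: alternative).

-- ===== PORT A =====
def infer_interaction_from_family_py (family_name : String) : String :=
  let name := PySem.Str.lower family_name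
  if ["bakery", "combine", "build", "sum", "total"].any (fun k => PySem.Str.isIn k name) then
    "combine_and_build"
  else if ["fire", "dispatch", "route", "sort", "assign"].any (fun k => PySem.Str.isIn k name) then
    "route_and_dispatch"
  else if ["unit circle", "angle", "navigate", "position", "circle", "coordinate"].any (fun k => PySem.Str.isIn k name) then
    "navigate_and_position"
  else if ["balance", "equal", "allocate", "distribute"].any (fun k => PySem.Str.isIn k name) then
    "allocate_and_balance"
  else if ["pattern", "sequence", "predict", "series"].any (fun k => PySem.Str.isIn k name) then
    "sequence_and_predict"
  else if ["transform", "function", "operation", "algebra"].any (fun k => PySem.Str.isIn k name) then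
    "transform_and_manipulate"
  else
    "combine_and_build"

-- ===== PORT B =====
-- _TYPES of Source B
def pvTypes : List String :=
  ["combine_and_build", "route_and_dispatch", "navigate_and_position",
   "allocate_and_balance", "sequence_and_predict", "transform_and_manipulate"]

-- _KEYWORD_PRIORITY of Source B (dict -> association list, insertion order)
def pvKeywordPriority : List (String × Int) :=
  [("bakery", 0), ("combine", 0), ("build", 0), ("sum", 0), ("total", 0),
   ("fire", 1), ("dispatch", 1), ("route", 1), ("sort", 1), ("assign", 1),
   ("unit circle", 2), ("angle", 2), ("navigate", 2), ("position", 2), ("circle", 2), ("coordinate", 2),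
   ("balance", 3), ("equal", 3), ("allocate", 3), ("distribute", 3),
   ("pattern", 4), ("sequence", 4), ("predict", 4), ("series", 4),
   ("transform", 5), ("function", 5), ("operation", 5), ("algebra", 5)]

-- best = min((p for k, p in _KEYWORD_PRIORITY.items() if k in name), default=0); return _TYPES[best]
-- (best is always 0..5, so the list index never raises; the .getD "" branch is unreachable)
def infer_interaction_from_family_py_alt (family_name : String) : String :=
  let name := PySem.Str.lower family_name
  let best := (PySem.List.min?
      ((pvKeywordPriority.filter (fun kp => PySem.Str.isIn kp.1 name)).map Prod.snd)
      (fun x => x)).getD 0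
  (PySem.List.pyGet? pvTypes best).getD ""

-- ===== PRECONDITION & SPEC =====
def Spec_infer_interaction_from_family_py (family_name : String) (out : String) : Prop := out = infer_interaction_from_family_py_alt family_name
instance (family_name : String) (out : String) : Decidable (Spec_infer_interaction_from_family_py family_name out) := by unfold Spec_infer_interaction_from_family_py; infer_instance

-- ===== CLAIM =====
def Claim_equal_infer_interaction_from_family_py : Prop := ∀ (family_name : String), Dom_infer_interaction_from_family_py family_name → Spec_infer_interaction_from_family_py family_name (infer_interaction_from_family_py family_name)

-- ===== LEMMAS AND PROOFS =====
theorem blockL (ks : List String) (i : Int) (q : String → Bool) :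
    ((ks.map (fun k => (k, i))).filter (fun kp => q kp.1)).map Prod.snd
      = (ks.filter q).map (fun _ => i) := by
  induction ks with
  | nil => rfl
  | cons a t ih =>
      simp only [List.map_cons, List.filter_cons]
      split_ifs <;> simp [ih]

theorem hsplit :
    pvKeywordPriority =
      (["bakery","combine","build","sum","total"].map (fun k => (k, (0:Int))))
      ++ (["fire","dispatch","route","sort","assign"].map (fun k => (k, (1:Int))))
      ++ (["unit circle","angle","navigate","position","circle","coordinate"].map (fun k => (k, (2:Int))))
      ++ (["balance","equal","allocate","distribute"].map (fun k => (k, (3:Int))))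
      ++ (["pattern","sequence","predict","series"].map (fun k => (k, (4:Int))))
      ++ (["transform","function","operation","algebra"].map (fun k => (k, (5:Int)))) := by
  rfl

theorem pv_min_getD (j : Int) (M : List Int) (hmem : j ∈ M) (hb : ∀ y ∈ M, j ≤ y) :
    (PySem.List.min? M (fun x => x)).getD 0 = j := by
  cases hmin : PySem.List.min? M (fun x => x) with
  | none =>
      have : M = [] := (PySem.List.min?_eq_none_iff M (fun x => x)).mp hmin
      subst this; simp at hmem
  | some m =>
      have h1 : m ∈ M := PySem.List.min?_mem hmin
      have h2 := PySem.List.min?_isMin hmin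
      have : m = j := le_antisymm (h2 j hmem) (hb m h1)
      simp [this]


theorem blockL' (ks : List String) (i : Int) (name : String) :
    ((ks.map (fun k => (k, i))).filter (fun kp => PySem.Str.isIn kp.1 name)).map Prod.snd
      = (ks.filter (fun k => PySem.Str.isIn k name)).map (fun _ => i) :=
  blockL ks i (fun k => PySem.Str.isIn k name)


theorem pv_core (name : String) :
    (if ["bakery", "combine", "build", "sum", "total"].any (fun k => PySem.Str.isIn k name) then
      "combine_and_build"
    else if ["fire", "dispatch", "route", "sort", "assign"].any (fun k => PySem.Str.isIn k name) then
      "route_and_dispatch"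
    else if ["unit circle", "angle", "navigate", "position", "circle", "coordinate"].any (fun k => PySem.Str.isIn k name) then
      "navigate_and_position"
    else if ["balance", "equal", "allocate", "distribute"].any (fun k => PySem.Str.isIn k name) then
      "allocate_and_balance"
    else if ["pattern", "sequence", "predict", "series"].any (fun k => PySem.Str.isIn k name) then
      "sequence_and_predict"
    else if ["transform", "function", "operation", "algebra"].any (fun k => PySem.Str.isIn k name) then
      "transform_and_manipulate"
    else
      "combine_and_build")
    = (PySem.List.pyGet? pvTypes
        ((PySem.List.min?
          ((pvKeywordPriority.filter (fun kp => PySem.Str.isIn kp.1 name)).map Prod.snd)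
          (fun x => x)).getD 0)).getD "" := by
  rw [hsplit]
  simp only [List.filter_append, List.map_append, blockL']
  set q : String → Bool := fun k => PySem.Str.isIn k name with hq
  have memL : ∀ (ks : List String) (i : Int) (y : Int),
      y ∈ (ks.filter q).map (fun _ => i) → y = i := by
    intro ks i y hy
    simp only [List.mem_map] at hy
    tauto
  have neL : ∀ (ks : List String) (i : Int), ks.any q = true →
      i ∈ (ks.filter q).map (fun _ => i) := by
    intro ks i h
    obtain ⟨k, hk, hqk⟩ := List.any_eq_true.mp h
    exact List.mem_map.mpr ⟨k, List.mem_filter.mpr ⟨hk, hqk⟩, rfl⟩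
  have emL : ∀ (ks : List String) (i : Int), ¬ (ks.any q = true) →
      (ks.filter q).map (fun _ => i) = [] := by
    intro ks i h
    have hf : ks.filter q = [] := by
      rw [List.filter_eq_nil_iff]
      intro a ha hqa
      exact h (List.any_eq_true.mpr ⟨a, ha, hqa⟩)
    rw [hf]; rfl
  by_cases h0 : ["bakery", "combine", "build", "sum", "total"].any q = true
  · rw [if_pos h0]
    rw [pv_min_getD 0]
    · rfl
    · exact (List.mem_append.mpr (Or.inl (List.mem_append.mpr (Or.inl (List.mem_append.mpr (Or.inl (List.mem_append.mpr (Or.inl (List.mem_append.mpr (Or.inl (neL ["bakery", "combine", "build", "sum", "total"] 0 h0)))))))))))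
    · intro y hy
      rcases List.mem_append.mp hy with hy|h
      · -- prefix
        rcases List.mem_append.mp hy with hy|h
        · -- prefix
          rcases List.mem_append.mp hy with hy|h
          · -- prefix
            rcases List.mem_append.mp hy with hy|h
            · -- prefix
              rcases List.mem_append.mp hy with hy|h
              · -- prefix
                have := memL _ _ _ hy; omega
              · have := memL _ _ _ h; omega
            · have := memL _ _ _ h; omega
          · have := memL _ _ _ h; omega
        · have := memL _ _ _ h; omega
      · have := memL _ _ _ h; omega
  by_cases h1 : ["fire", "dispatch", "route", "sort", "assign"].any q = true
  · rw [if_neg h0, if_pos h1]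
    rw [emL ["bakery", "combine", "build", "sum", "total"] 0 h0]
    simp only [List.nil_append]
    rw [pv_min_getD 1]
    · rfl
    · exact (List.mem_append.mpr (Or.inl (List.mem_append.mpr (Or.inl (List.mem_append.mpr (Or.inl (List.mem_append.mpr (Or.inl (neL ["fire", "dispatch", "route", "sort", "assign"] 1 h1)))))))))
    · intro y hy
      rcases List.mem_append.mp hy with hy|h
      · -- prefix
        rcases List.mem_append.mp hy with hy|h
        · -- prefix
          rcases List.mem_append.mp hy with hy|h
          · -- prefix
            rcases List.mem_append.mp hy with hy|h
            · -- prefix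
              have := memL _ _ _ hy; omega
            · have := memL _ _ _ h; omega
          · have := memL _ _ _ h; omega
        · have := memL _ _ _ h; omega
      · have := memL _ _ _ h; omega
  by_cases h2 : ["unit circle", "angle", "navigate", "position", "circle", "coordinate"].any q = true
  · rw [if_neg h0, if_neg h1, if_pos h2]
    rw [emL ["bakery", "combine", "build", "sum", "total"] 0 h0, emL ["fire", "dispatch", "route", "sort", "assign"] 1 h1]
    simp only [List.nil_append]
    rw [pv_min_getD 2]
    · rfl
    · exact (List.mem_append.mpr (Or.inl (List.mem_append.mpr (Or.inl (List.mem_append.mpr (Or.inl (neL ["unit circle", "angle", "navigate", "position", "circle", "coordinate"] 2 h2)))))))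
    · intro y hy
      rcases List.mem_append.mp hy with hy|h
      · -- prefix
        rcases List.mem_append.mp hy with hy|h
        · -- prefix
          rcases List.mem_append.mp hy with hy|h
          · -- prefix
            have := memL _ _ _ hy; omega
          · have := memL _ _ _ h; omega
        · have := memL _ _ _ h; omega
      · have := memL _ _ _ h; omega
  by_cases h3 : ["balance", "equal", "allocate", "distribute"].any q = true
  · rw [if_neg h0, if_neg h1, if_neg h2, if_pos h3]
    rw [emL ["bakery", "combine", "build", "sum", "total"] 0 h0, emL ["fire", "dispatch", "route", "sort", "assign"] 1 h1, emL ["unit circle", "angle", "navigate", "position", "circle", "coordinate"] 2 h2]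
    simp only [List.nil_append]
    rw [pv_min_getD 3]
    · rfl
    · exact (List.mem_append.mpr (Or.inl (List.mem_append.mpr (Or.inl (neL ["balance", "equal", "allocate", "distribute"] 3 h3)))))
    · intro y hy
      rcases List.mem_append.mp hy with hy|h
      · -- prefix
        rcases List.mem_append.mp hy with hy|h
        · -- prefix
          have := memL _ _ _ hy; omega
        · have := memL _ _ _ h; omega
      · have := memL _ _ _ h; omega
  by_cases h4 : ["pattern", "sequence", "predict", "series"].any q = true
  · rw [if_neg h0, if_neg h1, if_neg h2, if_neg h3, if_pos h4]
    rw [emL ["bakery", "combine", "build", "sum", "total"] 0 h0, emL ["fire", "dispatch", "route", "sort", "assign"] 1 h1, emL ["unit circle", "angle", "navigate", "position", "circle", "coordinate"] 2 h2, emL ["balance", "equal", "allocate", "distribute"] 3 h3]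
    simp only [List.nil_append]
    rw [pv_min_getD 4]
    · rfl
    · exact (List.mem_append.mpr (Or.inl (neL ["pattern", "sequence", "predict", "series"] 4 h4)))
    · intro y hy
      rcases List.mem_append.mp hy with hy|h
      · -- prefix
        have := memL _ _ _ hy; omega
      · have := memL _ _ _ h; omega
  by_cases h5 : ["transform", "function", "operation", "algebra"].any q = true
  · rw [if_neg h0, if_neg h1, if_neg h2, if_neg h3, if_neg h4, if_pos h5]
    rw [emL ["bakery", "combine", "build", "sum", "total"] 0 h0, emL ["fire", "dispatch", "route", "sort", "assign"] 1 h1, emL ["unit circle", "angle", "navigate", "position", "circle", "coordinate"] 2 h2, emL ["balance", "equal", "allocate", "distribute"] 3 h3, emL ["pattern", "sequence", "predict", "series"] 4 h4]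
    simp only [List.nil_append]
    rw [pv_min_getD 5]
    · rfl
    · exact (neL ["transform", "function", "operation", "algebra"] 5 h5)
    · intro y hy
      have := memL _ _ _ hy; omega
  · rw [if_neg h0, if_neg h1, if_neg h2, if_neg h3, if_neg h4, if_neg h5]
    rw [emL _ _ h0, emL _ _ h1, emL _ _ h2, emL _ _ h3, emL _ _ h4, emL _ _ h5]
    rfl

theorem pv_eq (s : String) :
    infer_interaction_from_family_py s = infer_interaction_from_family_py_alt s :=
  pv_core (PySem.Str.lower s)

-- ===== VERDICT =====
theorem infer_interaction_from_family_py_spec : Claim_equal_infer_interaction_from_family_py := by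
  intro s _
  unfold Spec_infer_interaction_from_family_py
  exact pv_eq s
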